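-- pv_equiv track=rewrite | github.com/chaewon-k/Algorithm-Practice | ETC/temp1/1번.py | solution
-- ===== SOURCE A (Python) =====
-- def solution(m,k):
--     answer = ''
--     j = 0
--     for i in range(len(m)):
--         if j == len(k):
--             answer += m[i:]
--             break
--         if m[i] == k[j]:
--             j += 1
--         else:
--             answer += m[i]
--     return answer
-- ===== SOURCE B (Python) =====
-- def solution(m, k):
--     parts = []
--     start = 0
--     for c in k:
--         idx = m.find(c, start)
--         if idx == -1:
--             parts.append(m[start:])
--             break
--         parts.append(m[start:idx])
--         start = idx + 1
--     else:
--         parts.append(m[start:])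
--     return ''.join(parts)
-- ===== Notes on version B (the rewrite author's own statement) =====
-- stated objective: alternative
-- what changed: B iterates over the characters of k, using str.find with a cursor into m and slice appends, instead of A's char-by-char scan of m with a pointer into k.
import Mathlib
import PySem

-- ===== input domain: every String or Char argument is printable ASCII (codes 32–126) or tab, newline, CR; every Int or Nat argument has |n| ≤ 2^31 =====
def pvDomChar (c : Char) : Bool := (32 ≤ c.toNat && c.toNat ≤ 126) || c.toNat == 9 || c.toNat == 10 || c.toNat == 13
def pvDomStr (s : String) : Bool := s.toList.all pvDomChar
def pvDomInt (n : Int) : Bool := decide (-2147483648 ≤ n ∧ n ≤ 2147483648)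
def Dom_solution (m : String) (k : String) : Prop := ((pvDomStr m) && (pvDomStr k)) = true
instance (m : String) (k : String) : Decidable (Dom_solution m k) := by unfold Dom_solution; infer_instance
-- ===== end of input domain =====

-- B removes the characters of k from m by subsequence matching via str.find/slicing
-- instead of A's char-by-char scan; same behaviour, alternative decomposition.

-- ===== PORT A =====
-- A's for-loop over range(len(m)) with early break, state (i, j); 'answer += x'
-- becomes consing/appending x in front of the recursion's result.
def solA_loop (mc kc : List Char) (i j : Nat) : List Char :=
  if _h : i < mc.length then
    if j = kc.length then mc.drop i                 -- answer += m[i:]; break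
    else if mc.getD i ' ' = kc.getD j ' ' then solA_loop mc kc (i+1) (j+1)
    else mc.getD i ' ' :: solA_loop mc kc (i+1) j   -- answer += m[i]
  else []
termination_by mc.length - i

def solution (m : String) (k : String) : String :=
  String.ofList (solA_loop m.toList k.toList 0 0)

-- ===== PORT B =====
-- m.find(c, start): first index ≥ start where m[idx] = c (none = -1). Exact port.
def findFrom (mc : List Char) (c : Char) (s : Nat) : Option Nat :=
  if _h : s < mc.length then
    if mc.getD s ' ' = c then some s else findFrom mc c (s+1)
  else none
termination_by mc.length - s

-- B's for-loop over the characters of k; m[start:idx] is take/drop (start ≤ idx, exact here).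
def solB_loop (mc : List Char) (start : Nat) : List Char → List Char
  | [] => mc.drop start                              -- parts.append(m[start:]) after the loop
  | c :: rest =>
    match findFrom mc c start with
    | none => mc.drop start                          -- parts.append(m[start:]); break
    | some idx => (mc.drop start).take (idx - start) ++ solB_loop mc (idx+1) rest

def solution_alt (m : String) (k : String) : String :=
  String.ofList (solB_loop m.toList 0 k.toList)

-- ===== PRECONDITION & SPEC =====
def Spec_solution (m : String) (k : String) (out : String) : Prop := out = solution_alt m k
instance (m : String) (k : String) (out : String) : Decidable (Spec_solution m k out) := by unfold Spec_solution; infer_instance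

-- ===== CLAIM (what is proved, stated in full; the proofs are below) =====
def Claim_equal_solution : Prop := ∀ (m : String) (k : String), Dom_solution m k → Spec_solution m k (solution m k)

-- ===== LEMMAS AND PROOFS =====

lemma solB_loop_cons (mc : List Char) (s : Nat) (c : Char) (rest : List Char) :
    solB_loop mc s (c :: rest) =
      match findFrom mc c s with
      | none => mc.drop s
      | some idx => (mc.drop s).take (idx - s) ++ solB_loop mc (idx+1) rest := rfl

lemma solB_loop_past (mc : List Char) (i : Nat) (hi : mc.length ≤ i) :
    ∀ ks, solB_loop mc i ks = [] := by
  intro ks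
  cases ks with
  | nil => simp [solB_loop, List.drop_eq_nil_iff.mpr hi]
  | cons c rest =>
    have hf : findFrom mc c i = none := by rw [findFrom]; simp; omega
    rw [solB_loop_cons, hf]
    simp [List.drop_eq_nil_iff.mpr hi]

lemma findFrom_ge (mc : List Char) (c : Char) :
    ∀ n s idx, mc.length - s ≤ n → findFrom mc c s = some idx → s ≤ idx := by
  intro n
  induction n with
  | zero =>
    intro s idx hn hf
    rw [findFrom] at hf
    have : ¬ s < mc.length := by omega
    simp [this] at hf
  | succ n ih =>
    intro s idx hn hf
    rw [findFrom] at hf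
    by_cases hs : s < mc.length
    · simp only [hs, dite_true] at hf
      by_cases he : mc.getD s ' ' = c
      · rw [if_pos he] at hf
        injection hf with h
        omega
      · rw [if_neg he] at hf
        have := ih (s+1) idx (by omega) hf
        omega
    · simp [hs] at hf

lemma solB_skip (mc : List Char) (c : Char) (rest : List Char) (i : Nat)
    (hi : i < mc.length) (hne : ¬ mc[i] = c) :
    solB_loop mc i (c :: rest) = mc[i] :: solB_loop mc (i+1) (c :: rest) := by
  have hdrop : mc.drop i = mc[i] :: mc.drop (i+1) := List.drop_eq_getElem_cons hi
  have hf : findFrom mc c i = findFrom mc c (i+1) := by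
    rw [findFrom]; simp [hi, hne]
  rw [solB_loop_cons, solB_loop_cons, hf]
  cases hcase : findFrom mc c (i+1) with
  | none => rw [hdrop]
  | some idx =>
    have hge := findFrom_ge mc c mc.length (i+1) idx (by omega) hcase
    have harith : idx - i = (idx - (i+1)) + 1 := by omega
    show List.take (idx - i) (List.drop i mc) ++ solB_loop mc (idx+1) rest
        = mc[i] :: (List.take (idx - (i+1)) (List.drop (i+1) mc) ++ solB_loop mc (idx+1) rest)
    rw [hdrop, harith, List.take_succ_cons, List.cons_append]

lemma loop_eq (mc kc : List Char) :
    ∀ n i j, mc.length - i ≤ n → j ≤ kc.length →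
      solA_loop mc kc i j = solB_loop mc i (kc.drop j) := by
  intro n
  induction n with
  | zero =>
    intro i j hn _
    have hi : ¬ i < mc.length := by omega
    rw [solA_loop]
    simp only [hi, dite_false]
    rw [solB_loop_past mc i (by omega)]
  | succ n ih =>
    intro i j hn hj
    rw [solA_loop]
    by_cases hi : i < mc.length
    · simp only [hi, dite_true]
      by_cases hjl : j = kc.length
      · subst hjl
        rw [List.drop_length, if_pos rfl]
        rfl
      · have hjlt : j < kc.length := by omega
        have hkd : kc.drop j = kc[j] :: kc.drop (j+1) := List.drop_eq_getElem_cons hjlt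
        have hkget : kc.getD j ' ' = kc[j] := List.getD_eq_getElem kc ' ' hjlt
        have hmget : mc.getD i ' ' = mc[i] := List.getD_eq_getElem mc ' ' hi
        simp only [hjl, if_false]
        by_cases heq : mc.getD i ' ' = kc.getD j ' '
        · have heq' : mc[i] = kc[j] := by rw [← hmget, heq, hkget]
          simp only [heq, if_true]
          have hf : findFrom mc kc[j] i = some i := by
            rw [findFrom]; simp [hi, heq']
          rw [hkd, solB_loop_cons, hf]
          simp [ih (i+1) (j+1) (by omega) (by omega)]
        · have hne' : ¬ mc[i] = kc[j] := by rw [← hmget, ← hkget]; exact heq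
          simp only [heq, if_false]
          rw [hkd, solB_skip mc kc[j] (kc.drop (j+1)) i hi hne', ← hkd, hmget]
          rw [ih (i+1) j (by omega) hj]
    · simp only [hi, dite_false]
      rw [solB_loop_past mc i (by omega)]

-- ===== VERDICT (by name: the statement is the Claim_ definition above) =====
theorem solution_spec : Claim_equal_solution := by
  intro m k _
  unfold Spec_solution solution solution_alt
  rw [loop_eq m.toList k.toList (m.toList.length) 0 0 (by omega) (by omega)]
  rfl
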